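-- pv_equiv track=rewrite | github.com/nevermore3d/Nevermore_Max | Software/Klipper/voc_algorithm.py | _fix16_div
-- ===== SOURCE A (Python) =====
-- _FIX16_MINIMUM = 0x80000000
--
-- _FIX16_OVERFLOW = 0x80000000
--
-- def _fix16_div(a, b):
--     a = int(a)
--     b = int(b)
--     if b == 0:
--         return _FIX16_MINIMUM
--     if a >= 0:
--         remainder = a
--     else:
--         remainder = (a * (-1)) & 0xFFFFFFFF
--     if b >= 0:
--         divider = b
--     else:
--         divider = (b * (-1)) & 0xFFFFFFFF
--     quotient = 0
--     bit = 0x10000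
--     while divider < remainder:
--         divider = divider << 1
--         bit <<= 1
--     if not bit:
--         return _FIX16_OVERFLOW
--     if divider & 0x80000000:
--         if remainder >= divider:
--             quotient |= bit
--             remainder -= divider
--         divider >>= 1
--         bit >>= 1
--     while bit and remainder:
--         if remainder >= divider:
--             quotient |= bit
--             remainder -= divider
--         remainder <<= 1
--         bit >>= 1
--     if remainder >= divider:
--         quotient += 1
--     result = quotient
--     if (a ^ b) & 0x80000000:
--         if result == _FIX16_MINIMUM:
--             return _FIX16_OVERFLOW
--         result = -result
--     return result
-- ===== SOURCE B (Python) =====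
-- _FIX16_MINIMUM = 0x80000000
--
-- _FIX16_OVERFLOW = 0x80000000
--
-- def _fix16_div(a, b):
--     a = int(a)
--     b = int(b)
--     if b == 0:
--         return _FIX16_MINIMUM
--     ra = a if a >= 0 else (-a) & 0xFFFFFFFF
--     rb = b if b >= 0 else (-b) & 0xFFFFFFFF
--     q, r = divmod(ra << 16, rb)
--     if 2 * r >= rb:
--         q += 1
--     if (a ^ b) & 0x80000000:
--         if q == _FIX16_MINIMUM:
--             return _FIX16_OVERFLOW
--         return -q
--     return q
-- ===== Notes on version B (the rewrite author's own statement) =====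
-- stated objective: simpler
-- what changed: Replaces A's normalization loop plus 17-33-step bitwise restoring long division with a single divmod of (magnitude<<16) by the divisor magnitude and a round-half-up test, keeping A's b==0 guard, 32-bit operand masking and xor-of-bit-31 sign rule.
import Mathlib
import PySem

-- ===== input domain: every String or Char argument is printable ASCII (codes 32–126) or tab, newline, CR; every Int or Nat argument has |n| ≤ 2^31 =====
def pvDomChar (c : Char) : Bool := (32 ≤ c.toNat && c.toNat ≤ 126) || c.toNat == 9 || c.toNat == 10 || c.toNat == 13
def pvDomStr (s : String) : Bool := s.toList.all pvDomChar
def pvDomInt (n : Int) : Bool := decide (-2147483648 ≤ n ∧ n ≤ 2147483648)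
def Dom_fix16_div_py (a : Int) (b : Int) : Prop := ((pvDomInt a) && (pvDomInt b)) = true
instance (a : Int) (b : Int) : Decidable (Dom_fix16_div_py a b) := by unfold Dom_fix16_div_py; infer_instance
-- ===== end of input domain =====

-- B replaces A's bitwise long-division loops with one integer divmod plus a round-half-up test
-- (same masked magnitudes, same sign rule); return values agree on the whole domain.

-- ===== PORT A =====

-- Port of `x if x >= 0 else (-x) & 0xFFFFFFFF` (the mask: Nat-and with 2^32-1; operand is
-- nonnegative there, so `.toNat` is exact).  Used by both ports (same line in both sources).
def pyMag (x : Int) : Nat := if 0 ≤ x then x.toNat else ((-x).toNat &&& 4294967295)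

-- Hand port of the truth value of `x & 0x80000000` for a Python int x (bit 31 of the two's
-- complement), exact for every Int: that bit is set iff x mod 2^32 ≥ 2^31.
def pyBit31 (x : Int) : Bool := decide ((2147483648 : Int) ≤ x.emod 4294967296)

-- Port of A's tail `if (a ^ b) & 0x80000000: ...` applied to quotient q; Python's
-- `(a ^ b) & 0x80000000` is nonzero iff bit 31 of a and of b differ (xor is bitwise).
-- B's source ends with the identical lines, so both ports use this helper.
def fxSign (a b : Int) (q : Nat) : Int :=
  if pyBit31 a != pyBit31 b then
    (if (q : Int) = 2147483648 then 2147483648 else -(q : Int))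
  else (q : Int)

-- Port of A's first loop `while divider < remainder: divider <<= 1; bit <<= 1`.
-- The fuel (48) is only a totality guard: on the stated domain divider ≥ 1 and
-- remainder ≤ 2^32, so the loop runs at most 33 times and the guard never cuts it short.
def fxNorm : Nat → Nat → Nat → Nat → Nat × Nat
  | 0, divider, bit, _ => (divider, bit)
  | fuel + 1, divider, bit, remainder =>
    if divider < remainder then fxNorm fuel (divider <<< 1) (bit <<< 1) remainder
    else (divider, bit)

-- Port of A's block `if divider & 0x80000000: ...` producing (quotient, remainder, divider, bit).
def fxPre (remainder divider bit : Nat) : Nat × Nat × Nat × Nat :=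
  if divider &&& 2147483648 ≠ 0 then
    if divider ≤ remainder then (0 ||| bit, remainder - divider, divider >>> 1, bit >>> 1)
    else (0, remainder, divider >>> 1, bit >>> 1)
  else (0, remainder, divider, bit)

-- Port of A's main loop `while bit and remainder: ...`, returning (quotient, remainder).
def fxLoop (quotient remainder bit divider : Nat) : Nat × Nat :=
  if h : bit ≠ 0 ∧ remainder ≠ 0 then
    if divider ≤ remainder then
      fxLoop (quotient ||| bit) ((remainder - divider) <<< 1) (bit >>> 1) divider
    else
      fxLoop quotient (remainder <<< 1) (bit >>> 1) divider
  else (quotient, remainder)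
termination_by bit
decreasing_by all_goals (simp only [Nat.shiftRight_eq_div_pow]; omega)

-- Port of A's final `if remainder >= divider: quotient += 1`.
def fxRound (qr : Nat × Nat) (divider : Nat) : Nat :=
  if divider ≤ qr.2 then qr.1 + 1 else qr.1

def fix16_div_py (a : Int) (b : Int) : Int :=
  if b = 0 then 2147483648
  else if (fxNorm 48 (pyMag b) 65536 (pyMag a)).2 = 0 then 2147483648  -- `if not bit:` guard
  else
    fxSign a b
      (fxRound
        (fxLoop (fxPre (pyMag a) (fxNorm 48 (pyMag b) 65536 (pyMag a)).1 (fxNorm 48 (pyMag b) 65536 (pyMag a)).2).1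
          (fxPre (pyMag a) (fxNorm 48 (pyMag b) 65536 (pyMag a)).1 (fxNorm 48 (pyMag b) 65536 (pyMag a)).2).2.1
          (fxPre (pyMag a) (fxNorm 48 (pyMag b) 65536 (pyMag a)).1 (fxNorm 48 (pyMag b) 65536 (pyMag a)).2).2.2.2
          (fxPre (pyMag a) (fxNorm 48 (pyMag b) 65536 (pyMag a)).1 (fxNorm 48 (pyMag b) 65536 (pyMag a)).2).2.2.1)
        (fxPre (pyMag a) (fxNorm 48 (pyMag b) 65536 (pyMag a)).1 (fxNorm 48 (pyMag b) 65536 (pyMag a)).2).2.2.1)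

-- ===== PORT B =====
-- Source B: q, r = divmod(ra << 16, rb); round half up; then the shared sign tail.
-- Nat `/` and `%` are exact for Python divmod on these nonnegative magnitudes (rb > 0 whenever
-- b ≠ 0 on the stated domain).
def fix16_div_py_alt (a : Int) (b : Int) : Int :=
  if b = 0 then 2147483648
  else
    fxSign a b
      (if pyMag b ≤ 2 * ((pyMag a <<< 16) % pyMag b) then (pyMag a <<< 16) / pyMag b + 1
       else (pyMag a <<< 16) / pyMag b)

-- ===== PRECONDITION & SPEC =====
def Spec_fix16_div_py (a : Int) (b : Int) (out : Int) : Prop := out = fix16_div_py_alt a b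
instance (a : Int) (b : Int) (out : Int) : Decidable (Spec_fix16_div_py a b out) := by unfold Spec_fix16_div_py; infer_instance

-- ===== CLAIM (what is proved, stated in full; the proofs are below) =====
def Claim_equal_fix16_div_py : Prop := ∀ (a : Int) (b : Int), Dom_fix16_div_py a b → Spec_fix16_div_py a b (fix16_div_py a b)

-- ===== LEMMAS AND PROOFS =====

-- round-half-up division, the common value of both pipelines
def rhu (x d : Nat) : Nat := x / d + (if d ≤ 2 * (x % d) then 1 else 0)

theorem rhu_zero (d : Nat) (hd : 0 < d) : rhu 0 d = 0 := by
  unfold rhu; simp [Nat.zero_div, Nat.zero_mod]; omega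

theorem rhu_eq_ite (x d : Nat) :
    rhu x d = (if d ≤ 2 * (x % d) then x / d + 1 else x / d) := by
  unfold rhu; split_ifs <;> omega

theorem rhu_add_mul (x c d : Nat) (hd : 0 < d) : rhu (x + c * d) d = c + rhu x d := by
  unfold rhu
  rw [Nat.add_mul_div_right _ _ hd, Nat.add_mul_mod_self_right]
  split_ifs <;> omega

theorem rhu_mul_right (x d c : Nat) (hc : 0 < c) : rhu (x * c) (d * c) = rhu x d := by
  unfold rhu
  rw [Nat.mul_div_mul_right _ _ hc, Nat.mul_mod_mul_right]
  have hiff : (d * c ≤ 2 * (x % d * c)) ↔ (d ≤ 2 * (x % d)) := by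
    rw [show 2 * (x % d * c) = (2 * (x % d)) * c by ring]
    exact Nat.mul_le_mul_right_iff hc
  simp [hiff]

theorem lor_eq_add (i t b : Nat) (hb : b < 2 ^ i) : (2 ^ i * t) ||| b = 2 ^ i * t + b :=
  (Nat.two_pow_add_eq_or_of_lt hb t).symm

theorem fxNorm_spec : ∀ (fuel d bit r : Nat), 0 < d → r ≤ 2 ^ fuel * d →
    ∃ k, fxNorm fuel d bit r = (2 ^ k * d, 2 ^ k * bit) ∧ r ≤ 2 ^ k * d := by
  intro fuel
  induction fuel with
  | zero =>
    intro d bit r hd hr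
    exact ⟨0, by simp [fxNorm], by simpa using hr⟩
  | succ n ih =>
    intro d bit r hd hr
    by_cases h : d < r
    · have hr' : r ≤ 2 ^ n * (d <<< 1) := by
        rw [Nat.shiftLeft_eq] at *
        calc r ≤ 2 ^ (n + 1) * d := hr
        _ = 2 ^ n * (d * 2 ^ 1) := by ring
      obtain ⟨k, hk, hle⟩ := ih (d <<< 1) (bit <<< 1) r (by simp [Nat.shiftLeft_eq]; omega) hr'
      refine ⟨k + 1, ?_, ?_⟩
      · have hstep : fxNorm (n + 1) d bit r = fxNorm n (d <<< 1) (bit <<< 1) r := by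
          simp [fxNorm, if_pos h]
        rw [hstep, hk, Prod.mk.injEq]
        constructor <;> (simp only [Nat.shiftLeft_eq, pow_succ]; ring)
      · calc r ≤ 2 ^ k * (d <<< 1) := hle
        _ = 2 ^ (k + 1) * d := by simp [Nat.shiftLeft_eq, pow_succ]; ring
    · exact ⟨0, by simp [fxNorm, if_neg h], by omega⟩

theorem div_facts (r d : Nat) (h1 : d ≤ r) (h2 : r < 2 * d) : r / d = 1 ∧ r % d = r - d := by
  constructor
  · have := Nat.div_add_mod r d
    have hlt : r / d < 2 := by
      by_contra hge
      push_neg at hge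
      have : 2 * d ≤ (r / d) * d := Nat.mul_le_mul_right d hge
      have := Nat.div_mul_le_self r d
      omega
    have hge : 1 ≤ r / d := (Nat.one_le_div_iff (by omega)).mpr h1
    omega
  · rw [Nat.mod_eq_sub_mod h1, Nat.mod_eq_of_lt (by omega)]

theorem fxLoop_spec : ∀ (s q r d : Nat), 0 < d → r < 2 * d → 2 ^ (s + 1) ∣ q →
    fxRound (fxLoop q r (2 ^ s) d) d = q + rhu (r * 2 ^ s) d := by
  intro s
  induction s with
  | zero =>
    intro q r d hd hr hq
    by_cases hr0 : r = 0
    · rw [fxLoop]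
      simp [hr0, fxRound, rhu_zero d hd, Nat.not_le.mpr hd]
    · obtain ⟨t, ht⟩ := hq
      rw [fxLoop]
      rw [dif_pos ⟨one_ne_zero, hr0⟩]
      by_cases hdr : d ≤ r
      · rw [if_pos hdr]
        obtain ⟨h1, h2⟩ := div_facts r d hdr hr
        have hlor : q ||| 1 = q + 1 := by
          have := lor_eq_add 1 t 1 (by norm_num)
          simpa [ht, pow_one] using this
        rw [fxLoop]
        simp only [pow_zero] at *
        rw [dif_neg (by simp)]
        simp only [fxRound, hlor, Nat.shiftLeft_eq, rhu, mul_one, h1, h2, pow_one]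
        split_ifs <;> omega
      · rw [if_neg hdr]
        rw [fxLoop]
        simp only [pow_zero] at *
        rw [dif_neg (by simp)]
        have h1 : r / d = 0 := Nat.div_eq_of_lt (by omega)
        have h2 : r % d = r := Nat.mod_eq_of_lt (by omega)
        simp only [fxRound, Nat.shiftLeft_eq, rhu, mul_one, h1, h2, pow_one]
        split_ifs <;> omega
  | succ n ih =>
    intro q r d hd hr hq
    by_cases hr0 : r = 0
    · rw [fxLoop]
      simp [hr0, fxRound, rhu_zero d hd, Nat.not_le.mpr hd]
    · obtain ⟨t, ht⟩ := hq
      rw [fxLoop]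
      rw [dif_pos ⟨by positivity, hr0⟩]
      have hshift : (2 ^ (n + 1) : Nat) >>> 1 = 2 ^ n := by
        simp [Nat.shiftRight_eq_div_pow, pow_succ]
      by_cases hdr : d ≤ r
      · rw [if_pos hdr]
        have hlor : q ||| 2 ^ (n + 1) = q + 2 ^ (n + 1) := by
          have := lor_eq_add (n + 2) t (2 ^ (n + 1)) (by
            exact Nat.pow_lt_pow_right (by norm_num) (by omega))
          simpa [ht] using this
        rw [hlor, hshift, Nat.shiftLeft_eq]
        have := ih (q + 2 ^ (n + 1)) ((r - d) * 2 ^ 1) d hd (by omega)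
          ⟨2 * t + 1, by rw [ht]; ring⟩
        rw [this]
        have harg : r * 2 ^ (n + 1) = (r - d) * 2 ^ 1 * 2 ^ n + 2 ^ (n + 1) * d := by
          obtain ⟨m, rfl⟩ : ∃ m, r = d + m := ⟨r - d, by omega⟩
          rw [Nat.add_sub_cancel_left, pow_succ]
          ring
        rw [harg, rhu_add_mul _ _ _ hd]
        ring
      · rw [if_neg hdr]
        rw [hshift, Nat.shiftLeft_eq]
        have := ih q (r * 2 ^ 1) d hd (by omega) ⟨2 * t, by rw [ht]; ring⟩
        rw [this]
        have harg : r * 2 ^ 1 * 2 ^ n = r * 2 ^ (n + 1) := by rw [pow_succ]; ring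
        rw [harg]

theorem core_eq (r rb : Nat) (hrb0 : 0 < rb) (hrb : rb ≤ 2147483648) (hr : r ≤ 4294967296) :
    fxRound
      (fxLoop (fxPre r (fxNorm 48 rb 65536 r).1 (fxNorm 48 rb 65536 r).2).1
        (fxPre r (fxNorm 48 rb 65536 r).1 (fxNorm 48 rb 65536 r).2).2.1
        (fxPre r (fxNorm 48 rb 65536 r).1 (fxNorm 48 rb 65536 r).2).2.2.2
        (fxPre r (fxNorm 48 rb 65536 r).1 (fxNorm 48 rb 65536 r).2).2.2.1)
      (fxPre r (fxNorm 48 rb 65536 r).1 (fxNorm 48 rb 65536 r).2).2.2.1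
    = (if rb ≤ 2 * ((r <<< 16) % rb) then (r <<< 16) / rb + 1 else (r <<< 16) / rb) := by
  rw [← rhu_eq_ite]
  obtain ⟨k, hnb, hle⟩ := fxNorm_spec 48 rb 65536 r hrb0
    (by calc r ≤ 4294967296 := hr
        _ ≤ 2 ^ 48 := by norm_num
        _ ≤ 2 ^ 48 * rb := Nat.le_mul_of_pos_right _ hrb0)
  rw [hnb]
  simp only [fxPre]
  have hβ : (2 : Nat) ^ k * 65536 = 2 ^ (k + 16) := by
    rw [pow_add]; norm_num
  have hrhu : rhu (r <<< 16) rb = rhu (r * 2 ^ (k + 16)) (2 ^ k * rb) := by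
    rw [Nat.shiftLeft_eq, show (2:Nat) ^ k * rb = rb * 2 ^ k by ring,
      show r * 2 ^ (k + 16) = (r * 2 ^ 16) * 2 ^ k by rw [pow_add]; ring]
    exact (rhu_mul_right _ _ _ (by positivity : (0:Nat) < 2 ^ k)).symm
  by_cases h31 : (2 ^ k * rb) &&& 2147483648 ≠ 0
  · -- the 0x80000000 branch: divider has bit 31 set, hence d' ≥ 2^31 and d' is even
    have htb : (2 ^ k * rb).testBit 31 = true := by
      rcases Bool.eq_false_or_eq_true ((2 ^ k * rb).testBit 31) with ht | hf
      · exact ht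
      · exfalso; apply h31
        rw [show (2147483648 : Nat) = 2 ^ 31 by norm_num, Nat.and_two_pow, hf]
        simp
    have hge : 2 ^ 31 ≤ 2 ^ k * rb := by
      by_contra hlt
      push_neg at hlt
      rw [Nat.testBit_lt_two_pow hlt] at htb
      exact Bool.false_ne_true htb
    have heven : ∃ e, 2 ^ k * rb = 2 * e := by
      rcases Nat.eq_zero_or_pos k with hk0 | hkpos
      · subst hk0
        simp only [pow_zero, one_mul] at hge ⊢
        have : rb = 2147483648 := by norm_num at hge; omega
        exact ⟨1073741824, by omega⟩
      · obtain ⟨k', rfl⟩ := Nat.exists_eq_succ_of_ne_zero (by omega : k ≠ 0)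
        exact ⟨2 ^ k' * rb, by rw [pow_succ]; ring⟩
    obtain ⟨e, he⟩ := heven
    have he0 : 0 < e := by
      have : (0:Nat) < 2 ^ 31 := by positivity
      omega
    have hd2 : (2 ^ k * rb) >>> 1 = e := by
      simp [Nat.shiftRight_eq_div_pow]; omega
    have hb2 : (2 ^ k * 65536) >>> 1 = 2 ^ (k + 15) := by
      rw [hβ]
      simp only [Nat.shiftRight_eq_div_pow, pow_one]
      rw [show k + 16 = (k + 15) + 1 by ring, pow_succ]
      omega
    rw [if_pos h31]
    by_cases hdr : 2 ^ k * rb ≤ r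
    · -- remainder = divider: one subtraction empties the remainder
      have hreq : r = 2 ^ k * rb := le_antisymm (by omega) hdr
      rw [if_pos hdr]
      simp only [Nat.zero_or, hd2, hb2]
      have hz : r - 2 ^ k * rb = 0 := by omega
      rw [hz]
      have := fxLoop_spec (k + 15) (2 ^ k * 65536) 0 e he0 (by omega)
        (by rw [hβ, show k + 15 + 1 = k + 16 by ring])
      rw [this, Nat.zero_mul, rhu_zero e he0, hrhu, hreq]
      rw [show (2:Nat) ^ k * rb * 2 ^ (k + 16) = 0 + 2 ^ (k + 16) * (2 ^ k * rb) by ring]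
      rw [rhu_add_mul _ _ _ (by omega), rhu_zero _ (by omega), hβ]
    · rw [if_neg hdr]
      simp only [hd2, hb2]
      have := fxLoop_spec (k + 15) 0 r e he0 (by omega) (dvd_zero _)
      rw [this, Nat.zero_add, hrhu]
      rw [show r * 2 ^ (k + 16) = (r * 2 ^ (k + 15)) * 2 ^ 1 by
            rw [show k + 16 = (k + 15) + 1 by ring, pow_succ]; ring,
          show (2:Nat) ^ k * rb = e * 2 ^ 1 by rw [pow_one]; omega]
      exact (rhu_mul_right _ _ _ (by norm_num)).symm
  · rw [if_neg h31]
    have hd0 : 0 < 2 ^ k * rb := by positivity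
    rw [hβ]
    have := fxLoop_spec (k + 16) 0 r (2 ^ k * rb) hd0 (by omega) (dvd_zero _)
    rw [this, Nat.zero_add, hrhu]

theorem pyMag_eq (x : Int) (h1 : -2147483648 ≤ x) (h2 : x ≤ 2147483648) :
    pyMag x = x.natAbs := by
  unfold pyMag
  split_ifs with h
  · omega
  · rw [show (4294967295 : Nat) = 2 ^ 32 - 1 by norm_num,
      Nat.and_two_pow_sub_one_eq_mod, Nat.mod_eq_of_lt (by omega)]
    omega

-- ===== VERDICT (by name: the statement is the Claim_ definition above) =====
theorem fix16_div_py_spec : Claim_equal_fix16_div_py := by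
  unfold Claim_equal_fix16_div_py
  intro a b hdom
  unfold Spec_fix16_div_py
  simp only [Dom_fix16_div_py, Bool.and_eq_true, pvDomInt, decide_eq_true_eq] at hdom
  obtain ⟨⟨ha1, ha2⟩, hb1, hb2⟩ := hdom
  by_cases hb : b = 0
  · simp [fix16_div_py, fix16_div_py_alt, hb]
  · have hmb : pyMag b = b.natAbs := pyMag_eq b hb1 hb2
    have hma : pyMag a = a.natAbs := pyMag_eq a ha1 ha2
    have hrb0 : 0 < pyMag b := by rw [hmb]; omega
    have hrb : pyMag b ≤ 2147483648 := by rw [hmb]; omega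
    have hr : pyMag a ≤ 4294967296 := by rw [hma]; omega
    obtain ⟨k, hnb, hle⟩ := fxNorm_spec 48 (pyMag b) 65536 (pyMag a) hrb0
      (by calc pyMag a ≤ 4294967296 := hr
          _ ≤ 2 ^ 48 := by norm_num
          _ ≤ 2 ^ 48 * pyMag b := Nat.le_mul_of_pos_right _ hrb0)
    have hbitne : (fxNorm 48 (pyMag b) 65536 (pyMag a)).2 ≠ 0 := by
      rw [hnb]; positivity
    rw [fix16_div_py, fix16_div_py_alt, if_neg hb, if_neg hb, if_neg hbitne,
      core_eq (pyMag a) (pyMag b) hrb0 hrb hr]
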